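-- pv_equiv track=rewrite | github.com/liupengsay/PyIsTheBestLang | src/string/palindrome_num.py | get_recent_palindrom_num
-- ===== SOURCE A (Python) =====
-- def get_recent_palindrom_num(n: str) -> list:
--     # 564. 寻找最近的回文数（https://leetcode.cn/problems/find-the-closest-palindrome/）
--     # P1609 最小回文数（https://www.luogu.com.cn/problem/P1609）
--     # 用原数的前半部分加一后的结果替换后半部分得到的回文整数。
--     # 用原数的前半部分减一后的结果替换后半部分得到的回文整数。
--     # 为防止位数变化导致构造的回文整数错误，因此直接构造 999…999 和 100…001 作为备选答案
--     # 计算正整数 n 附近的回文数，获得最近的最小或者最大的回文数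
--
--     m = len(n)
--     candidates = [10 ** (m - 1) - 1, 10 ** m + 1]
--     prefix = int(n[:(m + 1) // 2])
--     for x in range(prefix - 1, prefix + 2):
--         y = x if m % 2 == 0 else x // 10
--         while y:
--             x = x * 10 + y % 10
--             y //= 10
--         candidates.append(x)
--     return candidates
-- ===== SOURCE B (Python) =====
-- def _rev(y):
--     # reversed decimal digits of y together with 10 ** (digit count of y), for y >= 0
--     if y < 10:
--         return y, 10
--     r, p = _rev(y // 10)
--     return y % 10 * p + r, 10 * p
--
--
-- def get_recent_palindrom_num(n: str) -> list:
--     m = len(n)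
--     prefix = int(n[:(m + 1) // 2])
--
--     def pal(x):
--         y = x if m % 2 == 0 else x // 10
--         if y == 0:
--             return x
--         r, p = _rev(y)
--         return x * p + r
--
--     return [10 ** (m - 1) - 1, 10 ** m + 1] + [pal(x) for x in range(prefix - 1, prefix + 2)]
-- ===== Notes on version B (the rewrite author's own statement) =====
-- stated objective: alternative
-- what changed: A mirrors by mutating the candidate in place (x = x*10 + y%10 digit by digit); B computes the reversed digits and the matching power of ten once with a recursive helper and combines them with a single multiplication x*p + r, returning the three candidates as a comprehension appended to the two fallbacks.
import Mathlib
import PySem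

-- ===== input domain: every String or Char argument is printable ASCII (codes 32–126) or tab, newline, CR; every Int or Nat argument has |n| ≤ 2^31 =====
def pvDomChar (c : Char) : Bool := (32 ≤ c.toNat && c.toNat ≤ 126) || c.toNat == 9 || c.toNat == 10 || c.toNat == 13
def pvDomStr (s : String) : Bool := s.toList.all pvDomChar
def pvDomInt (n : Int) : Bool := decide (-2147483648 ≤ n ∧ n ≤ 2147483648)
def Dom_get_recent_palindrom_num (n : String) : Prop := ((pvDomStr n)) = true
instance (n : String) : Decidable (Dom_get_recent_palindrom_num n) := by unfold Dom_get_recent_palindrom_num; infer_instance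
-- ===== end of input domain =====

-- B replaces A's in-place digit-absorbing while-loop by a recursive helper returning
-- (reversed digits, power of ten) combined with a single multiplication (objective: alternative).

-- ===== PORT A =====
-- A's inner 'while y: x = x*10 + y%10; y //= 10' loop; exact for y ≥ 0 (Python's
-- loop diverges for y < 0, which Pre_ excludes: there prefix ≥ 1 forces y ≥ 0).
def pvMirA (x y : Int) : Int :=
  if 0 < y then pvMirA (x * 10 + PySem.Int.mod y 10) (PySem.Int.floordiv y 10) else x
termination_by y.toNat
decreasing_by
  rw [PySem.Int.floordiv_eq_ediv_of_pos (by norm_num)]; omega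

def get_recent_palindrom_num (n : String) : List Int :=
  let m : Int := PySem.Str.len n
  -- 10 ** (m - 1): exact for m ≥ 1 (for n = "" Python's 10 ** -1 is a float, excluded by Pre_)
  let candidates : List Int := [10 ^ (m - 1).toNat - 1, 10 ^ m.toNat + 1]
  -- int() raises ValueError when the slice does not parse (Option.elim's none branch);
  -- Pre_ excludes those inputs
  (PySem.Int.ofStr? (PySem.Str.slice n none (some (PySem.Int.floordiv (m + 1) 2)))).elim
    candidates
    (fun pfx =>
      (PySem.List.pyRange (pfx - 1) (pfx + 2) 1).foldl
        (fun cs x =>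
          cs ++ [pvMirA x (if PySem.Int.mod m 2 = 0 then x else PySem.Int.floordiv x 10)])
        candidates)

-- ===== PORT B =====
-- Source B's _rev: reversed decimal digits of y together with 10 ** (digit count of y)
def pvRevP (y : Int) : Int × Int :=
  if 10 ≤ y then
    let rp := pvRevP (PySem.Int.floordiv y 10)
    (PySem.Int.mod y 10 * rp.2 + rp.1, 10 * rp.2)
  else (y, 10)
termination_by y.toNat
decreasing_by
  rw [PySem.Int.floordiv_eq_ediv_of_pos (by norm_num)]; omega

-- Source B's pal
def pvPal (m x : Int) : Int :=
  let y := if PySem.Int.mod m 2 = 0 then x else PySem.Int.floordiv x 10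
  if y = 0 then x
  else
    let rp := pvRevP y
    x * rp.2 + rp.1

def get_recent_palindrom_num_alt (n : String) : List Int :=
  let m : Int := PySem.Str.len n
  -- int() raises where the slice does not parse; Pre_ excludes those inputs
  (PySem.Int.ofStr? (PySem.Str.slice n none (some (PySem.Int.floordiv (m + 1) 2)))).elim
    [10 ^ (m - 1).toNat - 1, 10 ^ m.toNat + 1]
    (fun pfx =>
      [10 ^ (m - 1).toNat - 1, 10 ^ m.toNat + 1]
        ++ (PySem.List.pyRange (pfx - 1) (pfx + 2) 1).map (pvPal m))

-- ===== PRECONDITION & SPEC =====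
-- Pre_ admits exactly the inputs whose prefix slice parses via int() to a value ≥ 1:
-- on a non-parsing slice A raises ValueError, and for a prefix ≤ 0 A's while-loop diverges
-- (its y stays negative forever); A returns normally everywhere Pre_ holds.
def Pre_get_recent_palindrom_num (n : String) : Prop :=
  1 ≤ (PySem.Int.ofStr? (PySem.Str.slice n none
        (some (PySem.Int.floordiv (PySem.Str.len n + 1) 2)))).getD 0
instance (n : String) : Decidable (Pre_get_recent_palindrom_num n) := by
  unfold Pre_get_recent_palindrom_num; infer_instance

def pvWitness_get_recent_palindrom_num : String := "12"

def Spec_get_recent_palindrom_num (n : String) (out : List Int) : Prop := out = get_recent_palindrom_num_alt n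
instance (n : String) (out : List Int) : Decidable (Spec_get_recent_palindrom_num n out) := by unfold Spec_get_recent_palindrom_num; infer_instance

-- ===== CLAIM (what is proved, stated in full; the proofs are below) =====
def Claim_equal_get_recent_palindrom_num : Prop := ∀ (n : String), Dom_get_recent_palindrom_num n → Pre_get_recent_palindrom_num n → Spec_get_recent_palindrom_num n (get_recent_palindrom_num n)

-- ===== LEMMAS AND PROOFS =====

-- A's accumulator loop equals B's (reversed digits, power) combination, for positive y.
lemma pvMirA_eq_revP (y : Int) (hy : 0 < y) :
    ∀ x : Int, pvMirA x y = x * (pvRevP y).2 + (pvRevP y).1 := by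
  induction hk : y.toNat using Nat.strong_induction_on generalizing y with
  | _ k ih =>
    intro x
    rw [pvMirA, if_pos hy, pvRevP]
    simp only [PySem.Int.floordiv_eq_ediv_of_pos (show (0:Int) < 10 by norm_num),
               PySem.Int.mod_eq_emod_of_pos (show (0:Int) < 10 by norm_num)]
    by_cases h10 : 10 ≤ y
    · rw [if_pos h10]
      have hq : 0 < y / 10 := by omega
      rw [ih (y / 10).toNat (by omega) (y / 10) hq rfl (x * 10 + y % 10)]
      dsimp only
      ring
    · rw [if_neg h10]
      have hq : y / 10 = 0 := by omega
      have hm : y % 10 = y := by omega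
      rw [hq, hm, pvMirA]
      norm_num

-- ===== VERDICT (by name: the statement is the Claim_ definition above) =====
theorem get_recent_palindrom_num_spec : Claim_equal_get_recent_palindrom_num := by
  intro n _ hpre
  unfold Spec_get_recent_palindrom_num get_recent_palindrom_num get_recent_palindrom_num_alt
  unfold Pre_get_recent_palindrom_num at hpre
  dsimp only
  cases hp : PySem.Int.ofStr? (PySem.Str.slice n none
      (some (PySem.Int.floordiv (PySem.Str.len n + 1) 2))) with
  | none => rw [hp] at hpre; simp at hpre
  | some p =>
    rw [hp] at hpre
    simp only [Option.getD_some] at hpre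
    simp only [Option.elim_some]
    rw [PySem.List.foldl_append_singleton_eq_map]
    congr 1
    apply List.map_congr_left
    intro x hx
    have hxge : p - 1 ≤ x := (PySem.List.mem_pyRange_one.mp hx).1
    unfold pvPal
    set y := if PySem.Int.mod (PySem.Str.len n) 2 = 0 then x else PySem.Int.floordiv x 10 with hy
    have hy0 : 0 ≤ y := by
      rw [hy]; split
      · omega
      · rw [PySem.Int.floordiv_eq_ediv_of_pos (by norm_num)]; omega
    by_cases hz : y = 0
    · rw [if_pos hz, hz, pvMirA]; norm_num
    · rw [if_neg hz]
      exact pvMirA_eq_revP y (by omega) x
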